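-- pv_equiv track=rewrite | github.com/verilog-to-routing/vtr-verilog-to-routing | vtr_flow/scripts/tuning_runs/control_runs.py | parse_script_params
-- ===== SOURCE A (Python) =====
-- PARAMS_DICT = {
--     "--seed": [1, 2],
--     "--place_algorithm": ["criticality_timing"],
--     "--place_agent_epsilon": [0.3],
-- }
--
-- def parse_script_params(script_params):
--     """Helper function to parse the script params values from earch row in
--     the parse_results.txt"""
--
--     parsed_params = {key: "" for key in PARAMS_DICT}
--
--     parts = script_params.split("_")
--     i = 0
--
--     while i < len(parts):
--         for key in PARAMS_DICT:
--             key_parts = key.split("_")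
--             key_length = len(key_parts)
--
--             if parts[i : i + key_length] == key_parts:
--                 value_parts = []
--                 j = i + key_length
--
--                 while j < len(parts) and not any(
--                     parts[j : j + len(k.split("_"))] == k.split("_")
--                     for k in PARAMS_DICT
--                 ):
--                     value_parts.append(parts[j])
--                     j += 1
--
--                 parsed_params[key] = "_".join(value_parts)
--                 i = j - 1
--                 break
--
--         i += 1
--
--     return parsed_params
-- ===== SOURCE B (Python) =====
-- PARAMS_DICT = {
--     "--seed": [1, 2],
--     "--place_algorithm": ["criticality_timing"],
--     "--place_agent_epsilon": [0.3],
-- }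
--
--
-- def parse_script_params(script_params):
--     """Two-pass parser: first record (start, key, key_length) matches while
--     scanning the parts once, then cut each value out of parts between a match's
--     end and the next match's start."""
--     parsed_params = {key: "" for key in PARAMS_DICT}
--     splits = [(key, key.split("_")) for key in PARAMS_DICT]
--
--     parts = script_params.split("_")
--     n = len(parts)
--
--     matches = []
--     i = 0
--     while i < n:
--         for key, key_parts in splits:
--             if parts[i : i + len(key_parts)] == key_parts:
--                 matches.append((i, key, len(key_parts)))
--                 i += len(key_parts)
--                 break
--         else:
--             i += 1
--
--     for idx, (start, key, key_length) in enumerate(matches):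
--         next_start = matches[idx + 1][0] if idx + 1 < len(matches) else n
--         parsed_params[key] = "_".join(parts[start + key_length : next_start])
--
--     return parsed_params
-- ===== Notes on version B (the rewrite author's own statement) =====
-- stated objective: alternative
-- what changed: Replaces A's nested while loops (inner loop collecting value tokens until the next key match, with i = j - 1 backtracking) by two passes: one forward scan recording (start, key, key_length) match tuples, then a slicing pass that joins parts[start+key_length : next_match_start] for each recorded match.
import Mathlib
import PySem

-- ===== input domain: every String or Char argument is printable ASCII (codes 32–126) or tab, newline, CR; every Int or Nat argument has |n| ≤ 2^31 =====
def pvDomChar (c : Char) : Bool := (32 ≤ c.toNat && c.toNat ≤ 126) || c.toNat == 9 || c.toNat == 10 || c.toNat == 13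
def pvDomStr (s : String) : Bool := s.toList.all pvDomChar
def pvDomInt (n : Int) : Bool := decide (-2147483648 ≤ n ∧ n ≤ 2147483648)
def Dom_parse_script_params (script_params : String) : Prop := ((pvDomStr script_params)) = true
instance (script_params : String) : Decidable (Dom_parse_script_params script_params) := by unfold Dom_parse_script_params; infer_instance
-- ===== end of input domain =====

-- B rewrites A's nested while loops as a two-pass scan (record key matches, then slice the
-- value segments between consecutive matches); same cost, different decomposition.

-- ===== PORT A =====

-- keys of PARAMS_DICT, in insertion order
def pvKeysA : List String := ["--seed", "--place_algorithm", "--place_agent_epsilon"]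

-- 'for key in PARAMS_DICT: … if parts[i:i+key_length] == key_parts: … break' — first matching key
def pvFindA (parts : List String) (i : Nat) : List String → Option (String × List String)
  | [] => none
  | k :: rest =>
    let kp := (PySem.Str.split? k "_").getD []
    if PySem.List.slice parts (some (i : Int)) (some ((i : Int) + (kp.length : Int))) = kp then
      some (k, kp)
    else pvFindA parts i rest

-- 'any(parts[j:j+len(k.split("_"))] == k.split("_") for k in PARAMS_DICT)'
def pvAnyA (parts : List String) (j : Nat) : Bool :=
  pvKeysA.any (fun k =>
    let kp := (PySem.Str.split? k "_").getD []
    PySem.List.slice parts (some (j : Int)) (some ((j : Int) + (kp.length : Int))) == kp)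

-- the inner 'while j < len(parts) and not any(…): value_parts.append(parts[j]); j += 1'
def pvCollectA (parts : List String) (j : Nat) (acc : List String) : Nat × List String :=
  if j < parts.length ∧ pvAnyA parts j = false then
    pvCollectA parts (j + 1) (acc ++ [PySem.List.pyGetD parts (j : Int) ""])
  else (j, acc)
termination_by parts.length - j
decreasing_by omega

theorem pvCollectA_fst_ge (parts : List String) (j : Nat) (acc : List String) :
    j ≤ (pvCollectA parts j acc).1 := by
  fun_induction pvCollectA parts j acc with
  | case1 j acc h ih => omega
  | case2 => simp

theorem pvFindA_some_len (parts : List String) (i : Nat) (k : String) (kp : List String)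
    (h : pvFindA parts i pvKeysA = some (k, kp)) : 1 ≤ kp.length := by
  simp only [pvKeysA, pvFindA] at h
  split_ifs at h <;> simp only [Option.some.injEq, Prod.mk.injEq] at h <;>
    (obtain ⟨-, rfl⟩ := h; decide)

-- the outer while loop; after a match, 'i = j - 1' then 'i += 1' resumes at j
def pvLoopA (parts : List String) (d : PySem.Dict String String) (i : Nat) :
    PySem.Dict String String :=
  if i < parts.length then
    match hf : pvFindA parts i pvKeysA with
    | some (k, kp) =>
      let r := pvCollectA parts (i + kp.length) []
      pvLoopA parts (d.insert k (PySem.Str.join "_" r.2)) r.1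
    | none => pvLoopA parts d (i + 1)
  else d
termination_by parts.length - i
decreasing_by
  · have h1 := pvCollectA_fst_ge parts (i + kp.length) []
    have h2 := pvFindA_some_len parts i k kp hf
    omega
  · omega

-- '{key: "" for key in PARAMS_DICT}'
def pvInitA : PySem.Dict String String :=
  ((PySem.Dict.empty.insert "--seed" "").insert "--place_algorithm" "").insert
    "--place_agent_epsilon" ""

def parse_script_params (script_params : String) : List (String × String) :=
  let parts := (PySem.Str.split? script_params "_").getD []
  (pvLoopA parts pvInitA 0).items

-- ===== PORT B =====

def pvKeysB : List String := ["--seed", "--place_algorithm", "--place_agent_epsilon"]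

-- 'splits = [(key, key.split("_")) for key in PARAMS_DICT]'
def pvSplitsB : List (String × List String) :=
  pvKeysB.map (fun k => (k, (PySem.Str.split? k "_").getD []))

-- the for/else over splits: first matching (key, key_length)
def pvFindB (parts : List String) (i : Nat) : List (String × List String) → Option (String × Nat)
  | [] => none
  | (k, kp) :: rest =>
    if PySem.List.slice parts (some (i : Int)) (some ((i : Int) + (kp.length : Int))) = kp then
      some (k, kp.length)
    else pvFindB parts i rest

theorem pvFindB_some_len (parts : List String) (i : Nat) (k : String) (L : Nat)
    (h : pvFindB parts i pvSplitsB = some (k, L)) : 1 ≤ L := by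
  simp only [pvSplitsB, pvKeysB, List.map, pvFindB] at h
  split_ifs at h <;> simp only [Option.some.injEq, Prod.mk.injEq] at h <;>
    (obtain ⟨-, rfl⟩ := h; decide)

-- first pass: 'while i < n: … matches.append((i, key, len(key_parts))); i += len(key_parts) … else i += 1'
def pvScanB (parts : List String) (i : Nat) : List (Nat × String × Nat) :=
  if i < parts.length then
    match hf : pvFindB parts i pvSplitsB with
    | some (k, L) => (i, k, L) :: pvScanB parts (i + L)
    | none => pvScanB parts (i + 1)
  else []
termination_by parts.length - i
decreasing_by
  · have := pvFindB_some_len parts i k L hf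
    omega
  · omega

-- second pass: value of each match is parts[start+key_length : next_start] joined back with "_"
def pvBuildB (parts : List String) (d : PySem.Dict String String) :
    List (Nat × String × Nat) → PySem.Dict String String
  | [] => d
  | (s, k, L) :: rest =>
    let nxt : Nat := match rest with
      | [] => parts.length
      | (s2, _, _) :: _ => s2
    pvBuildB parts
      (d.insert k (PySem.Str.join "_"
        (PySem.List.slice parts (some ((s + L : Nat) : Int)) (some ((nxt : Nat) : Int))))) rest

def pvInitB : PySem.Dict String String :=
  ((PySem.Dict.empty.insert "--seed" "").insert "--place_algorithm" "").insert
    "--place_agent_epsilon" ""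

def parse_script_params_alt (script_params : String) : List (String × String) :=
  let parts := (PySem.Str.split? script_params "_").getD []
  (pvBuildB parts pvInitB (pvScanB parts 0)).items

-- ===== PRECONDITION & SPEC =====
def Spec_parse_script_params (script_params : String) (out : List (String × String)) : Prop := out = parse_script_params_alt script_params
instance (script_params : String) (out : List (String × String)) : Decidable (Spec_parse_script_params script_params out) := by unfold Spec_parse_script_params; infer_instance

-- ===== CLAIM (what is proved, stated in full; the proofs are below) =====
def Claim_equal_parse_script_params : Prop := ∀ (script_params : String), Dom_parse_script_params script_params → Spec_parse_script_params script_params (parse_script_params script_params)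

-- ===== LEMMAS AND PROOFS =====

-- B's first pass finds the same (key, length) as A's for-loop finds (key, key_parts)
theorem pvFind_eq (parts : List String) (i : Nat) :
    pvFindB parts i pvSplitsB =
      (pvFindA parts i pvKeysA).map (fun p => (p.1, p.2.length)) := by
  simp only [pvSplitsB, pvKeysB, pvKeysA, List.map, pvFindB, pvFindA]
  split_ifs <;> rfl

-- A's 'any(…)' is exactly 'some key matches', i.e. pvFindA succeeds
theorem pvAny_iff (parts : List String) (j : Nat) :
    pvAnyA parts j = true ↔ (pvFindA parts j pvKeysA).isSome := by
  simp only [pvAnyA, pvKeysA, pvFindA, List.any_cons, List.any_nil]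
  split_ifs <;> simp_all

theorem pvAny_false (parts : List String) (j : Nat) (h : pvAnyA parts j = false) :
    pvFindA parts j pvKeysA = none := by
  have := pvAny_iff parts j
  cases hf : pvFindA parts j pvKeysA <;> simp_all

-- the landing position of A's inner while loop (proof-side description)
def pvStop (parts : List String) (j : Nat) : Nat :=
  if j < parts.length ∧ pvAnyA parts j = false then pvStop parts (j + 1) else j
termination_by parts.length - j
decreasing_by omega

theorem pvStop_ge (parts : List String) (j : Nat) : j ≤ pvStop parts j := by
  fun_induction pvStop parts j <;> omega

theorem pvStop_le (parts : List String) (j : Nat) (h : j ≤ parts.length) :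
    pvStop parts j ≤ parts.length := by
  fun_induction pvStop parts j <;> omega

theorem pvStop_spec (parts : List String) (j : Nat) :
    ¬ (pvStop parts j < parts.length ∧ pvAnyA parts (pvStop parts j) = false) := by
  fun_induction pvStop parts j with
  | case1 j h ih => exact ih
  | case2 j h => exact h

-- unfolding helpers for B's scan
theorem pvScanB_cons (parts : List String) (i : Nat) (k : String) (L : Nat)
    (hi : i < parts.length) (hf : pvFindB parts i pvSplitsB = some (k, L)) :
    pvScanB parts i = (i, k, L) :: pvScanB parts (i + L) := by
  rw [pvScanB.eq_def, if_pos hi]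
  split <;> simp_all

theorem pvScanB_skip (parts : List String) (i : Nat)
    (hi : i < parts.length) (hf : pvFindB parts i pvSplitsB = none) :
    pvScanB parts i = pvScanB parts (i + 1) := by
  rw [pvScanB.eq_def, if_pos hi]
  split <;> simp_all

theorem pvScanB_end (parts : List String) (i : Nat) (hi : ¬ i < parts.length) :
    pvScanB parts i = [] := by
  rw [pvScanB.eq_def, if_neg hi]

-- A's inner loop: stops at pvStop and collects exactly the slice parts[j : pvStop]
theorem pvCollectA_eq (parts : List String) (j : Nat) (acc : List String) :
    pvCollectA parts j acc = (pvStop parts j, acc ++ (parts.drop j).take (pvStop parts j - j)) := by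
  fun_induction pvCollectA parts j acc with
  | case1 j acc h ih =>
    rw [pvStop.eq_def parts j, if_pos h, ih]
    obtain ⟨hj, -⟩ := h
    have hst := pvStop_ge parts (j + 1)
    have hd : parts.drop j = parts[j] :: parts.drop (j + 1) := List.drop_eq_getElem_cons hj
    have hget : PySem.List.pyGetD parts (j : Int) "" = parts[j] := by
      rw [PySem.List.pyGetD_natCast]; exact List.getD_eq_getElem parts "" hj
    rw [hget, hd]
    have hk : pvStop parts (j + 1) - j = (pvStop parts (j + 1) - (j + 1)) + 1 := by omega
    rw [hk, List.take_succ_cons]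
    simp
  | case2 j acc h =>
    rw [pvStop.eq_def, if_neg h]
    simp

-- B's scan is unchanged while A's inner loop walks through non-matching positions
theorem pvScan_stop (parts : List String) (j : Nat) :
    pvScanB parts j = pvScanB parts (pvStop parts j) := by
  fun_induction pvStop parts j with
  | case1 j h ih =>
    obtain ⟨hj, ha⟩ := h
    have hfB : pvFindB parts j pvSplitsB = none := by
      rw [pvFind_eq, pvAny_false parts j ha]; rfl
    rw [pvScanB_skip parts j hj hfB]; exact ih
  | case2 => rfl

-- at the landing position, B's scan either ends (position = len) or records a match there,
-- so the 'next match start' B uses is exactly the landing position (or len when it is len)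
theorem pvScan_head (parts : List String) (j : Nat) (hle : j ≤ parts.length) :
    (match pvScanB parts (pvStop parts j) with
      | [] => parts.length
      | (s2, _, _) :: _ => s2) = pvStop parts j := by
  have hsp := pvStop_spec parts j
  have hle' := pvStop_le parts j hle
  by_cases hlt : pvStop parts j < parts.length
  · have ha : pvAnyA parts (pvStop parts j) = true := by
      cases h : pvAnyA parts (pvStop parts j)
      · exact absurd ⟨hlt, h⟩ hsp
      · rfl
    have hs := (pvAny_iff parts (pvStop parts j)).mp ha
    cases hf : pvFindA parts (pvStop parts j) pvKeysA with
    | none => rw [hf] at hs; simp at hs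
    | some p =>
      have hfB : pvFindB parts (pvStop parts j) pvSplitsB = some (p.1, p.2.length) := by
        rw [pvFind_eq, hf]; rfl
      rw [pvScanB_cons parts (pvStop parts j) p.1 p.2.length hlt hfB]
  · have hj : pvStop parts j = parts.length := by omega
    rw [pvScanB_end parts (pvStop parts j) hlt, hj]

-- a successful match of key_parts kp at i means the slice really had kp.length elements
theorem pvMatch_le (parts : List String) (i : Nat) (kp : List String)
    (hi : i < parts.length)
    (h : PySem.List.slice parts (some (i : Int)) (some ((i : Int) + (kp.length : Int))) = kp) :
    i + kp.length ≤ parts.length := by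
  have hlen : (PySem.List.slice parts (some (i : Int))
      (some ((i : Int) + (kp.length : Int)))).length = kp.length := by rw [h]
  rw [PySem.List.slice_natCast_add] at hlen
  simp only [List.length_take, List.length_drop] at hlen
  omega

theorem pvFindA_bound (parts : List String) (i : Nat) (k : String) (kp : List String)
    (hi : i < parts.length) (h : pvFindA parts i pvKeysA = some (k, kp)) :
    i + kp.length ≤ parts.length := by
  simp only [pvKeysA, pvFindA] at h
  split_ifs at h with h1 h2 h3 <;>
    simp only [Option.some.injEq, Prod.mk.injEq] at h <;>
    obtain ⟨-, rfl⟩ := h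
  · exact pvMatch_le parts i _ hi h1
  · exact pvMatch_le parts i _ hi h2
  · exact pvMatch_le parts i _ hi h3

-- MAIN: A's stateful loop equals B's build pass applied to B's recorded matches
theorem pvMain (parts : List String) (i : Nat) (d : PySem.Dict String String) :
    pvLoopA parts d i = pvBuildB parts d (pvScanB parts i) := by
  fun_induction pvLoopA parts d i with
  | case1 d i hi k kp hf r ih =>
    -- A matched key k (key_parts kp) at i
    have hb : i + kp.length ≤ parts.length := pvFindA_bound parts i k kp hi hf
    have hfB : pvFindB parts i pvSplitsB = some (k, kp.length) := by
      rw [pvFind_eq, hf]; rfl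
    rw [pvScanB_cons parts i k kp.length hi hfB]
    have hr : r = (pvStop parts (i + kp.length),
        (parts.drop (i + kp.length)).take (pvStop parts (i + kp.length) - (i + kp.length))) := by
      simpa using pvCollectA_eq parts (i + kp.length) []
    simp only [pvBuildB]
    rw [ih, pvScan_stop parts (i + kp.length), pvScan_head parts (i + kp.length) hb, hr]
    rw [PySem.List.slice_natCast]
  | case2 d i hi hf ih =>
    have hfB : pvFindB parts i pvSplitsB = none := by
      rw [pvFind_eq, hf]; rfl
    rw [pvScanB_skip parts i hi hfB]
    exact ih
  | case3 d i hi =>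
    rw [pvScanB_end parts i hi]
    rfl

-- ===== VERDICT (by name: the statement is the Claim_ definition above) =====
theorem parse_script_params_spec : Claim_equal_parse_script_params := by
  intro s _
  show (pvLoopA ((PySem.Str.split? s "_").getD []) pvInitA 0).items =
      (pvBuildB ((PySem.Str.split? s "_").getD [])
        pvInitB (pvScanB ((PySem.Str.split? s "_").getD []) 0)).items
  rw [show pvInitB = pvInitA from rfl, pvMain]
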